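-- pv_equiv track=rewrite | github.com/hjcdg1/baekjoon-ps-old | practice03_dp/11052.py | maxCost
-- ===== SOURCE A (Python) =====
-- def maxCost(n, cost) :
--     C = [0 for _ in range(n+1)]
--     C[1] = cost[1]
--     for i in range(2, n+1) :
--         max_ = cost[i]
--         for j in range(1, i) :
--             if (C[i-j] + C[j] > max_) :
--                 max_ = C[i-j] + C[j]
--         C[i] = max_
--     return C[n]
-- ===== SOURCE B (Python) =====
-- def maxCost(n, cost):
--     # unbounded-knapsack recurrence: peel one pack of size j off i and pay its raw cost
--     D = [0] * (n + 1)
--     D[1] = cost[1]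
--     for i in range(2, n + 1):
--         D[i] = max(D[i - j] + cost[j] for j in range(1, i + 1))
--     return D[n]
-- ===== Notes on version B (the rewrite author's own statement) =====
-- stated objective: alternative
-- what changed: Replaces A's split recurrence C[i]=max(cost[i], max over 1<=j<i of C[i-j]+C[j]) (two DP lookups, separate cost[i] base case) by the unbounded-knapsack recurrence D[i]=max over 1<=j<=i of D[i-j]+cost[j] (one DP lookup plus the raw pack cost, j=i subsuming the base case), with the inner scan written as max() over a generator instead of an if-accumulator loop.
import Mathlib
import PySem

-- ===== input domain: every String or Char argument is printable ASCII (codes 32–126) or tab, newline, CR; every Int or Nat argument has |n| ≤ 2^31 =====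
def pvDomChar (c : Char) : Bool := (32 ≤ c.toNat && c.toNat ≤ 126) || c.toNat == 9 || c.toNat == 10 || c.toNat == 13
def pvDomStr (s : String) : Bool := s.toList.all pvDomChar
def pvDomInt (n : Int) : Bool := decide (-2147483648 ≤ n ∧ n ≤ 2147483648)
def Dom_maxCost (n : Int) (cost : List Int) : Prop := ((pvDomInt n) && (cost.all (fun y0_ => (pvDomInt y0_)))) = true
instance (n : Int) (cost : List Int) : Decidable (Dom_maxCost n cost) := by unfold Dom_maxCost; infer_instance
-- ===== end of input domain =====

-- B replaces A's split recurrence max(cost[i], C[i-j]+C[j]) by the unbounded-knapsack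
-- recurrence max over 1 ≤ j ≤ i of D[i-j]+cost[j]; the two DPs are proved to agree.

-- ===== PORT A =====
def maxCost (n : Int) (cost : List Int) : Int :=
  -- C = [0 for _ in range(n+1)]
  let C : List Int := (PySem.List.pyRange 0 (n+1) 1).map (fun _ => 0)
  -- C[1] = cost[1]   (IndexError excluded by Pre_)
  let C := PySem.List.pySetD C 1 (PySem.List.pyGetD cost 1 0)
  -- for i in range(2, n+1): max_ accumulator over j in range(1, i), then C[i] = max_
  let C := (PySem.List.pyRange 2 (n+1) 1).foldl (fun C i =>
      PySem.List.pySetD C i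
        ((PySem.List.pyRange 1 i 1).foldl (fun m j =>
            if PySem.List.pyGetD C (i-j) 0 + PySem.List.pyGetD C j 0 > m
            then PySem.List.pyGetD C (i-j) 0 + PySem.List.pyGetD C j 0 else m)
          (PySem.List.pyGetD cost i 0))) C
  PySem.List.pyGetD C n 0

-- ===== PORT B =====
def maxCost_alt (n : Int) (cost : List Int) : Int :=
  -- D = [0] * (n+1)
  let D : List Int := List.replicate (n+1).toNat 0
  -- D[1] = cost[1]   (IndexError excluded by Pre_)
  let D := PySem.List.pySetD D 1 (PySem.List.pyGetD cost 1 0)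
  -- for i in range(2, n+1): D[i] = max(D[i-j] + cost[j] for j in range(1, i+1))
  let D := (PySem.List.pyRange 2 (n+1) 1).foldl (fun D i =>
      PySem.List.pySetD D i
        ((PySem.List.max?
            ((PySem.List.pyRange 1 (i+1) 1).map
              (fun j => PySem.List.pyGetD D (i-j) 0 + PySem.List.pyGetD cost j 0))
            (fun x => x)).getD 0)) D
  PySem.List.pyGetD D n 0

-- ===== PRECONDITION & SPEC =====
-- Pre_ is exactly the inputs on which the Python A returns: otherwise C[1] = cost[1]
-- or cost[i] (i ≤ n) raises IndexError.
def Pre_maxCost (n : Int) (cost : List Int) : Prop := 1 ≤ n ∧ n < (cost.length : Int)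
instance (n : Int) (cost : List Int) : Decidable (Pre_maxCost n cost) := by unfold Pre_maxCost; infer_instance
def pvWitness_maxCost : Int × List Int := (2, [0, 3, 5])

def Spec_maxCost (n : Int) (cost : List Int) (out : Int) : Prop := out = maxCost_alt n cost
instance (n : Int) (cost : List Int) (out : Int) : Decidable (Spec_maxCost n cost out) := by unfold Spec_maxCost; infer_instance

-- ===== CLAIM (what is proved, stated in full; the proofs are below) =====
def Claim_equal_maxCost : Prop := ∀ (n : Int) (cost : List Int), Dom_maxCost n cost → Pre_maxCost n cost → Spec_maxCost n cost (maxCost n cost)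

-- ===== LEMMAS AND PROOFS =====

-- generic running-max fold lemmas
theorem le_fmax_init {β : Type} (l : List β) (f : β → Int) (init : Int) :
    init ≤ l.foldl (fun m k => max m (f k)) init := by
  induction l generalizing init with
  | nil => simp
  | cons x t ih => exact le_trans (le_max_left _ _) (ih _)

theorem le_fmax_of_mem {β : Type} (f : β → Int) {x : β} :
    ∀ (l : List β) (init : Int), x ∈ l → f x ≤ l.foldl (fun m k => max m (f k)) init := by
  intro l
  induction l with
  | nil => intro init h; simp at h
  | cons y t ih =>
    intro init h
    rcases List.mem_cons.1 h with rfl | h'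
    · exact le_trans (le_max_right _ _) (le_fmax_init _ _ _)
    · exact ih _ h'

theorem fmax_cases {β : Type} (l : List β) (f : β → Int) (init : Int) :
    l.foldl (fun m k => max m (f k)) init = init ∨
      ∃ x ∈ l, l.foldl (fun m k => max m (f k)) init = f x := by
  induction l generalizing init with
  | nil => exact Or.inl rfl
  | cons y t ih =>
    rcases ih (max init (f y)) with h | ⟨x, hx, hfx⟩
    · rcases max_choice init (f y) with hm | hm
      · exact Or.inl (by simpa [hm] using h)
      · exact Or.inr ⟨y, List.mem_cons_self, by simpa [hm] using h⟩
    · exact Or.inr ⟨x, List.mem_cons_of_mem _ hx, hfx⟩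

theorem if_gt_eq_max (x a : Int) : (if a > x then a else x) = max x a := by
  split_ifs with h
  · exact (max_eq_right (le_of_lt h)).symm
  · exact (max_eq_left (by omega)).symm

-- the mathematical DP table (A's recurrence), built as a list of its own prefix values
def cfStep (c : Nat → Int) (L : List Int) (i : Nat) : Int :=
  (List.range (i-1)).foldl (fun m k => max m (L.getD (i-1-k) 0 + L.getD (k+1) 0)) (c i)

def CfL (c : Nat → Int) : Nat → List Int
  | 0 => [0]
  | (i+1) => CfL c i ++ [if i = 0 then c 1 else cfStep c (CfL c i) (i+1)]

def Cf (c : Nat → Int) (i : Nat) : Int := (CfL c i).getD i 0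

theorem CfL_length (c : Nat → Int) (n : Nat) : (CfL c n).length = n + 1 := by
  induction n with
  | zero => rfl
  | succ n ih => simp [CfL, ih]

theorem CfL_getD (c : Nat → Int) {k n : Nat} (h : k ≤ n) : (CfL c n).getD k 0 = Cf c k := by
  induction n with
  | zero => interval_cases k; rfl
  | succ n ih =>
    rcases Nat.lt_or_ge k (n+1) with hk | hk
    · rw [CfL, List.getD_append _ _ _ _ (by rw [CfL_length]; omega)]
      exact ih (by omega)
    · have : k = n + 1 := by omega
      subst this; rfl

theorem Cf_zero (c : Nat → Int) : Cf c 0 = 0 := rfl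

theorem Cf_one (c : Nat → Int) : Cf c 1 = c 1 := by
  simp [Cf, CfL]

theorem Cf_rec (c : Nat → Int) {m : Nat} (hm : 1 ≤ m) :
    Cf c (m+1) = (List.range m).foldl (fun x k => max x (Cf c (m-k) + Cf c (k+1))) (c (m+1)) := by
  obtain ⟨m', rfl⟩ : ∃ m', m = m' + 1 := ⟨m - 1, by omega⟩
  have h1 : Cf c (m'+1+1) = cfStep c (CfL c (m'+1)) (m'+1+1) := by
    show (CfL c (m'+1+1)).getD (m'+1+1) 0 = _
    rw [CfL, if_neg (by omega)]
    have hl := CfL_length c (m'+1)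
    rw [List.getD_eq_getElem?_getD, List.getElem?_append_right (by omega)]
    simp [hl]
  rw [h1, cfStep]
  have h2 : m' + 1 + 1 - 1 = m' + 1 := by omega
  rw [h2]
  refine PySem.List.foldl_congr_mem _ _ _ _ (fun acc x hx => ?_)
  have hxm : x < m' + 1 := List.mem_range.1 hx
  rw [CfL_getD c (show m'+1-x ≤ m'+1 by omega), CfL_getD c (show x+1 ≤ m'+1 by omega)]

theorem c_le_Cf (c : Nat → Int) {i : Nat} (h : 1 ≤ i) : c i ≤ Cf c i := by
  match i, h with
  | 1, _ => rw [Cf_one]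
  | (m+2), _ =>
    rw [Cf_rec c (show 1 ≤ m+1 by omega)]
    exact le_fmax_init _ _ _

theorem Cf_superadd (c : Nat → Int) {a b : Nat} (ha : 1 ≤ a) (hb : 1 ≤ b) :
    Cf c a + Cf c b ≤ Cf c (a+b) := by
  obtain ⟨a', rfl⟩ : ∃ a', a = a' + 1 := ⟨a - 1, by omega⟩
  obtain ⟨b', rfl⟩ : ∃ b', b = b' + 1 := ⟨b - 1, by omega⟩
  have h : (a'+1) + (b'+1) = (a'+b'+1) + 1 := by omega
  rw [h, Cf_rec c (show 1 ≤ a'+b'+1 by omega)]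
  have hmem : b' ∈ List.range (a'+b'+1) := List.mem_range.2 (by omega)
  have h2 := le_fmax_of_mem (fun k => Cf c (a'+b'+1-k) + Cf c (k+1))
    (List.range (a'+b'+1)) (c (a'+b'+1+1)) hmem
  simp only [show a'+b'+1-b' = a'+1 from by omega] at h2
  exact h2

theorem term_le_Cf (c : Nat → Int) {j i : Nat} (hj : 1 ≤ j) (hji : j ≤ i) :
    Cf c (i-j) + c j ≤ Cf c i := by
  rcases eq_or_lt_of_le hji with rfl | hlt
  · simp only [Nat.sub_self, Cf_zero, zero_add]
    exact c_le_Cf c hj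
  · have h1 : c j ≤ Cf c j := c_le_Cf c hj
    have h2 : Cf c (i-j) + Cf c j ≤ Cf c ((i-j)+j) := Cf_superadd c (by omega) hj
    have e : (i-j)+j = i := by omega
    rw [e] at h2
    omega

theorem Cf_attained (c : Nat → Int) : ∀ i : Nat, 1 ≤ i →
    ∃ j, 1 ≤ j ∧ j ≤ i ∧ Cf c i ≤ Cf c (i-j) + c j := by
  intro i
  induction i using Nat.strong_induction_on with
  | _ i IH =>
    intro hi
    match i, hi with
    | 1, _ => exact ⟨1, le_refl 1, le_refl 1, by simp [Cf_one, Cf_zero]⟩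
    | (m+2), _ =>
      rcases fmax_cases (List.range (m+1)) (fun k => Cf c (m+1-k) + Cf c (k+1)) (c (m+2))
        with h | ⟨k, hk, h⟩
      · refine ⟨m+2, by omega, le_refl _, ?_⟩
        rw [Cf_rec c (show 1 ≤ m+1 by omega), h]
        simp [Cf_zero]
      · have hkm : k < m + 1 := List.mem_range.1 hk
        obtain ⟨j', hj'1, hj'2, hj'3⟩ := IH (k+1) (by omega) (by omega)
        have hCf : Cf c (m+2) = Cf c (m+1-k) + Cf c (k+1) := by
          rw [Cf_rec c (show 1 ≤ m+1 by omega)]; exact h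
        rcases eq_or_lt_of_le hj'2 with heq | hlt
        · refine ⟨k+1, by omega, by omega, ?_⟩
          have e0 : Cf c (k+1-j') + c j' = c (k+1) := by rw [← heq]; simp [Cf_zero]
          rw [e0] at hj'3
          have e : m+2-(k+1) = m+1-k := by omega
          rw [hCf, e]
          omega
        · refine ⟨j', hj'1, by omega, ?_⟩
          have hsa : Cf c (m+1-k) + Cf c (k+1-j') ≤ Cf c ((m+1-k)+(k+1-j')) :=
            Cf_superadd c (by omega) (by omega)
          have e : (m+1-k)+(k+1-j') = m+2-j' := by omega
          rw [e] at hsa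
          rw [hCf]
          omega

-- loop-step helpers naming the ports' fold bodies
def cOf (cost : List Int) : Nat → Int := fun j => cost.getD j 0

def stepA (cost : List Int) (C : List Int) (i : Int) : List Int :=
  PySem.List.pySetD C i
    ((PySem.List.pyRange 1 i 1).foldl (fun m j =>
        if PySem.List.pyGetD C (i-j) 0 + PySem.List.pyGetD C j 0 > m
        then PySem.List.pyGetD C (i-j) 0 + PySem.List.pyGetD C j 0 else m)
      (PySem.List.pyGetD cost i 0))

def stepB (cost : List Int) (D : List Int) (i : Int) : List Int :=
  PySem.List.pySetD D i
    ((PySem.List.max?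
        ((PySem.List.pyRange 1 (i+1) 1).map
          (fun j => PySem.List.pyGetD D (i-j) 0 + PySem.List.pyGetD cost j 0))
        (fun x => x)).getD 0)

def initL (N : Nat) (cost : List Int) : List Int :=
  (List.replicate (N+1) (0:Int)).set 1 (PySem.List.pyGetD cost 1 0)

theorem map_zero_eq_replicate (l : List Int) :
    l.map (fun _ => (0:Int)) = List.replicate l.length 0 := by
  induction l with
  | nil => rfl
  | cons x t ih => simp [List.replicate_succ, ih]

theorem maxCost_eq (N : Nat) (cost : List Int) :
    maxCost (N : Int) cost =
      (((PySem.List.pyRange 2 ((N:Int)+1) 1).foldl (stepA cost) (initL N cost)).getD N 0) := by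
  have h0 : ((PySem.List.pyRange 0 ((N:Int)+1) 1).map (fun _ => (0:Int)))
      = List.replicate (N+1) (0:Int) := by
    rw [map_zero_eq_replicate, PySem.List.length_pyRange_one,
      show (((N:Int)+1) - 0).toNat = N+1 from by omega]
  have h1 : PySem.List.pySetD (List.replicate (N+1) (0:Int)) 1 (PySem.List.pyGetD cost 1 0)
      = initL N cost := by
    rw [show (1:Int) = ((1:Nat):Int) from rfl, PySem.List.pySetD_natCast]
    rfl
  show PySem.List.pyGetD _ (N:Int) 0 = _
  rw [PySem.List.pyGetD_natCast]
  simp only [h0, h1]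
  rfl

theorem maxCost_alt_eq (N : Nat) (cost : List Int) :
    maxCost_alt (N : Int) cost =
      (((PySem.List.pyRange 2 ((N:Int)+1) 1).foldl (stepB cost) (initL N cost)).getD N 0) := by
  have h0 : List.replicate ((N:Int)+1).toNat (0:Int) = List.replicate (N+1) (0:Int) := by
    rw [show ((N:Int)+1).toNat = N+1 from by omega]
  have h1 : PySem.List.pySetD (List.replicate (N+1) (0:Int)) 1 (PySem.List.pyGetD cost 1 0)
      = initL N cost := by
    rw [show (1:Int) = ((1:Nat):Int) from rfl, PySem.List.pySetD_natCast]
    rfl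
  show PySem.List.pyGetD _ (N:Int) 0 = _
  rw [PySem.List.pyGetD_natCast]
  simp only [h0, h1]
  rfl

theorem initL_length (N : Nat) (cost : List Int) : (initL N cost).length = N + 1 := by
  simp [initL]

theorem initL_getD_zero (N : Nat) (cost : List Int) (h1 : 1 ≤ N) :
    (initL N cost).getD 0 0 = 0 := by
  rw [initL, List.getD_eq_getElem?_getD,
    List.getElem?_set_of_lt _ _ (by rw [List.length_replicate]; omega)]
  simp

theorem initL_getD_one (N : Nat) (cost : List Int) (h1 : 1 ≤ N) (_hlen : 1 < cost.length) :
    (initL N cost).getD 1 0 = cost.getD 1 0 := by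
  have hget : PySem.List.pyGetD cost (1:Int) 0 = cost.getD 1 0 := by
    rw [show (1:Int) = ((1:Nat):Int) from rfl, PySem.List.pyGetD_natCast]
  rw [initL, List.getD_eq_getElem?_getD,
    List.getElem?_set_of_lt _ _ (by rw [List.length_replicate]; omega)]
  rw [if_pos rfl, Option.getD_some, hget]

-- A's inner accumulator loop computes exactly Cf (m+1)
theorem innerA (cost L : List Int) (m : Nat) (hm : 1 ≤ m)
    (hL : ∀ k ≤ m, L.getD k 0 = Cf (cOf cost) k) :
    (PySem.List.pyRange 1 ((m:Int)+1) 1).foldl (fun x j =>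
        if PySem.List.pyGetD L (((m:Int)+1)-j) 0 + PySem.List.pyGetD L j 0 > x
        then PySem.List.pyGetD L (((m:Int)+1)-j) 0 + PySem.List.pyGetD L j 0 else x)
      (PySem.List.pyGetD cost ((m:Int)+1) 0) = Cf (cOf cost) (m+1) := by
  have hc : PySem.List.pyGetD cost ((m:Int)+1) 0 = cOf cost (m+1) := by
    rw [show ((m:Int)+1) = ((m+1:Nat):Int) from by push_cast; ring, PySem.List.pyGetD_natCast]
    rfl
  rw [PySem.List.pyRange_one, show (((m:Int)+1) - 1).toNat = m from by omega,
    List.foldl_map, hc, Cf_rec (cOf cost) hm]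
  refine PySem.List.foldl_congr_mem _ _ _ _ (fun acc k hk => ?_)
  have hkm : k < m := List.mem_range.1 hk
  have e1 : ((m:Int)+1) - (1+(k:Nat)) = ((m-k:Nat):Int) := by omega
  have e2 : ((1:Int)+(k:Nat)) = ((k+1:Nat):Int) := by push_cast; ring
  rw [e1, e2, PySem.List.pyGetD_natCast, PySem.List.pyGetD_natCast,
    hL _ (by omega), hL _ (by omega)]
  exact if_gt_eq_max _ _

-- B's max() over the generator computes exactly Cf (m+1)
theorem innerB (cost L : List Int) (m : Nat) (hm : 1 ≤ m)
    (hL : ∀ k ≤ m, L.getD k 0 = Cf (cOf cost) k) :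
    ((PySem.List.max? ((PySem.List.pyRange 1 (((m:Int)+1)+1) 1).map
        (fun j => PySem.List.pyGetD L (((m:Int)+1)-j) 0 + PySem.List.pyGetD cost j 0))
      (fun x => x)).getD 0) = Cf (cOf cost) (m+1) := by
  have hlist : (PySem.List.pyRange 1 (((m:Int)+1)+1) 1).map
      (fun j => PySem.List.pyGetD L (((m:Int)+1)-j) 0 + PySem.List.pyGetD cost j 0)
      = (List.range (m+1)).map (fun k => Cf (cOf cost) (m-k) + cOf cost (k+1)) := by
    rw [PySem.List.pyRange_one, show ((((m:Int)+1)+1) - 1).toNat = m+1 from by omega,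
      List.map_map]
    refine List.map_congr_left (fun k hk => ?_)
    have hkm : k < m+1 := List.mem_range.1 hk
    show PySem.List.pyGetD L (((m:Int)+1)-(1+(k:Nat))) 0 + PySem.List.pyGetD cost ((1:Int)+(k:Nat)) 0 = _
    have e1 : ((m:Int)+1) - (1+(k:Nat)) = ((m-k:Nat):Int) := by omega
    have e2 : ((1:Int)+(k:Nat)) = ((k+1:Nat):Int) := by push_cast; ring
    rw [e1, e2, PySem.List.pyGetD_natCast, PySem.List.pyGetD_natCast, hL _ (by omega)]
    rfl
  rw [hlist]
  obtain ⟨v, hv⟩ : ∃ v, PySem.List.max?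
      ((List.range (m+1)).map (fun k => Cf (cOf cost) (m-k) + cOf cost (k+1)))
      (fun x => x) = some v := by
    cases hmx : PySem.List.max?
        ((List.range (m+1)).map (fun k => Cf (cOf cost) (m-k) + cOf cost (k+1)))
        (fun x => x) with
    | none =>
      have := (PySem.List.max?_eq_none_iff _ _).1 hmx
      simp at this
    | some v => exact ⟨v, rfl⟩
  rw [hv, Option.getD_some]
  have hub : ∀ y ∈ (List.range (m+1)).map (fun k => Cf (cOf cost) (m-k) + cOf cost (k+1)),
      y ≤ Cf (cOf cost) (m+1) := by
    intro y hy
    obtain ⟨k, hk, rfl⟩ := List.mem_map.1 hy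
    have hkm : k < m+1 := List.mem_range.1 hk
    have ht := term_le_Cf (cOf cost) (show 1 ≤ k+1 by omega) (show k+1 ≤ m+1 by omega)
    have e : m+1-(k+1) = m-k := by omega
    rw [e] at ht
    exact ht
  apply le_antisymm
  · exact hub v (PySem.List.max?_mem hv)
  · obtain ⟨j, hj1, hj2, hj3⟩ := Cf_attained (cOf cost) (m+1) (by omega)
    have hmem : Cf (cOf cost) (m-(j-1)) + cOf cost ((j-1)+1)
        ∈ (List.range (m+1)).map (fun k => Cf (cOf cost) (m-k) + cOf cost (k+1)) :=
      List.mem_map_of_mem (List.mem_range.2 (by omega))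
    have hle := PySem.List.max?_isMax hv _ hmem
    simp only at hle
    have e1 : m-(j-1) = m+1-j := by omega
    have e2 : (j-1)+1 = j := by omega
    rw [e1, e2] at hle
    omega

-- the common loop invariant: after the loop has run up to m, entry k holds Cf k for k ≤ m
theorem loopA_inv (cost : List Int) (N : Nat) (h1 : 1 ≤ N) (hlen : N < cost.length) :
    ∀ m, 1 ≤ m → m ≤ N →
      (((PySem.List.pyRange 2 ((m:Int)+1) 1).foldl (stepA cost) (initL N cost)).length = N + 1) ∧
      (∀ k ≤ m, ((PySem.List.pyRange 2 ((m:Int)+1) 1).foldl (stepA cost) (initL N cost)).getD k 0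
        = Cf (cOf cost) k) := by
  intro m
  induction m with
  | zero => intro h; omega
  | succ m ih =>
    intro _ hmN
    by_cases hm0 : m = 0
    · subst hm0
      rw [show ((((0:Nat)+1:Nat):Int)+1) = 2 from by norm_num,
        PySem.List.pyRange_one_eq_nil (le_refl 2), List.foldl_nil]
      refine ⟨initL_length N cost, fun k hk => ?_⟩
      interval_cases k
      · rw [initL_getD_zero N cost h1]; rfl
      · rw [initL_getD_one N cost h1 (by omega), Cf_one]; rfl
    · have hm1 : 1 ≤ m := by omega
      obtain ⟨hlenIH, hgetIH⟩ := ih hm1 (by omega)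
      have hsplit : PySem.List.pyRange 2 (((m+1:Nat):Int)+1) 1
          = PySem.List.pyRange 2 ((m:Int)+1) 1 ++ [((m:Int)+1)] := by
        rw [show (((m+1:Nat):Int)+1) = (((m:Int)+1)+1) from by push_cast; ring]
        exact PySem.List.pyRange_one_succ_right (by omega)
      rw [hsplit, List.foldl_append, List.foldl_cons, List.foldl_nil]
      set L := (PySem.List.pyRange 2 ((m:Int)+1) 1).foldl (stepA cost) (initL N cost) with hLdef
      have hstep : stepA cost L ((m:Int)+1) = L.set (m+1) (Cf (cOf cost) (m+1)) := by
        rw [stepA, innerA cost L m hm1 hgetIH,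
          show ((m:Int)+1) = ((m+1:Nat):Int) from by push_cast; ring,
          PySem.List.pySetD_natCast]
      rw [hstep]
      refine ⟨by rw [List.length_set]; exact hlenIH, fun k hk => ?_⟩
      rw [List.getD_eq_getElem?_getD, List.getElem?_set_of_lt _ _ (by rw [hlenIH]; omega)]
      rcases eq_or_ne (m+1) k with rfl | hne
      · simp
      · rw [if_neg hne, ← List.getD_eq_getElem?_getD]
        exact hgetIH k (by omega)

theorem loopB_inv (cost : List Int) (N : Nat) (h1 : 1 ≤ N) (hlen : N < cost.length) :
    ∀ m, 1 ≤ m → m ≤ N →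
      (((PySem.List.pyRange 2 ((m:Int)+1) 1).foldl (stepB cost) (initL N cost)).length = N + 1) ∧
      (∀ k ≤ m, ((PySem.List.pyRange 2 ((m:Int)+1) 1).foldl (stepB cost) (initL N cost)).getD k 0
        = Cf (cOf cost) k) := by
  intro m
  induction m with
  | zero => intro h; omega
  | succ m ih =>
    intro _ hmN
    by_cases hm0 : m = 0
    · subst hm0
      rw [show ((((0:Nat)+1:Nat):Int)+1) = 2 from by norm_num,
        PySem.List.pyRange_one_eq_nil (le_refl 2), List.foldl_nil]
      refine ⟨initL_length N cost, fun k hk => ?_⟩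
      interval_cases k
      · rw [initL_getD_zero N cost h1]; rfl
      · rw [initL_getD_one N cost h1 (by omega), Cf_one]; rfl
    · have hm1 : 1 ≤ m := by omega
      obtain ⟨hlenIH, hgetIH⟩ := ih hm1 (by omega)
      have hsplit : PySem.List.pyRange 2 (((m+1:Nat):Int)+1) 1
          = PySem.List.pyRange 2 ((m:Int)+1) 1 ++ [((m:Int)+1)] := by
        rw [show (((m+1:Nat):Int)+1) = (((m:Int)+1)+1) from by push_cast; ring]
        exact PySem.List.pyRange_one_succ_right (by omega)
      rw [hsplit, List.foldl_append, List.foldl_cons, List.foldl_nil]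
      set L := (PySem.List.pyRange 2 ((m:Int)+1) 1).foldl (stepB cost) (initL N cost) with hLdef
      have hstep : stepB cost L ((m:Int)+1) = L.set (m+1) (Cf (cOf cost) (m+1)) := by
        rw [stepB, innerB cost L m hm1 hgetIH,
          show ((m:Int)+1) = ((m+1:Nat):Int) from by push_cast; ring,
          PySem.List.pySetD_natCast]
      rw [hstep]
      refine ⟨by rw [List.length_set]; exact hlenIH, fun k hk => ?_⟩
      rw [List.getD_eq_getElem?_getD, List.getElem?_set_of_lt _ _ (by rw [hlenIH]; omega)]
      rcases eq_or_ne (m+1) k with rfl | hne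
      · simp
      · rw [if_neg hne, ← List.getD_eq_getElem?_getD]
        exact hgetIH k (by omega)

-- ===== VERDICT (by name: the statement is the Claim_ definition above) =====
theorem maxCost_spec : Claim_equal_maxCost := by
  intro n cost _ hpre
  obtain ⟨hn, hlen⟩ := hpre
  obtain ⟨N, rfl⟩ : ∃ N : Nat, n = (N : Int) := ⟨n.toNat, (Int.toNat_of_nonneg (by omega)).symm⟩
  have h1 : 1 ≤ N := by omega
  have hN : N < cost.length := by omega
  show maxCost (N : Int) cost = maxCost_alt (N : Int) cost
  rw [maxCost_eq, maxCost_alt_eq,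
    (loopA_inv cost N h1 hN N h1 (le_refl N)).2 N (le_refl N),
    (loopB_inv cost N h1 hN N h1 (le_refl N)).2 N (le_refl N)]
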